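-- pv_equiv track=rewrite | github.com/unvoidf/cursor-conductor | .cursor/hooks/task_conductor.py | count_tasks
-- ===== SOURCE A (Python) =====
-- def count_tasks(plan_content: str) -> dict:
--     """Count task statuses in a plan.md file."""
--     counts = {
--         "pending": 0,       # [ ]
--         "in_progress": 0,   # [~]
--         "completed": 0,     # [x]
--         "skipped": 0,       # [-]
--     }
--
--     for line in plan_content.split("\n"):
--         stripped = line.strip()
--         if stripped.startswith("- [ ] "):
--             counts["pending"] += 1
--         elif stripped.startswith("- [~] "):
--             counts["in_progress"] += 1
--         elif stripped.startswith("- [x] "):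
--             counts["completed"] += 1
--         elif stripped.startswith("- [-] "):
--             counts["skipped"] += 1
--
--     return counts
-- ===== SOURCE B (Python) =====
-- def count_tasks(plan_content: str) -> dict:
--     """Count task statuses in a plan.md file.
--
--     Declarative staged version: strip all lines once, then build the result
--     with a dict comprehension that counts, per marker, the lines starting
--     with that marker's frame -- no mutable counters, no per-line dispatch.
--     """
--     stripped = [line.strip() for line in plan_content.split("\n")]
--     markers = [("pending", " "), ("in_progress", "~"),
--                ("completed", "x"), ("skipped", "-")]
--     return {name: sum(s.startswith("- [" + m + "] ") for s in stripped)
--             for name, m in markers}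
-- ===== Notes on version B (the rewrite author's own statement) =====
-- stated objective: idiomatic
-- what changed: A makes one imperative pass dispatching each line through an if/elif chain into four mutable counters; B has no accumulator at all: it strips all lines once, then a dict comprehension computes each of the four counts by an independent counting pass (sum of startswith tests) per marker.
import Mathlib
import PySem

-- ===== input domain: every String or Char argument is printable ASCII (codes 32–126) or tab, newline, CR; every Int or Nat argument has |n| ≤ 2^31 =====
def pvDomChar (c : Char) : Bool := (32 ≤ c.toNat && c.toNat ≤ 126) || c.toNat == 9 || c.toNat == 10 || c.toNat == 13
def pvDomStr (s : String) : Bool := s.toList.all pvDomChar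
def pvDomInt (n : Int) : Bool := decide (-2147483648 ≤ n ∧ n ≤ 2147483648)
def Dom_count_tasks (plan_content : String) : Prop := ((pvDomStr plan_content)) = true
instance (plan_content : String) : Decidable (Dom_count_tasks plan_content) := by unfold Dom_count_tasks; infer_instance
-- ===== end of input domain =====

-- B drops A's per-line if/elif dispatch into mutable counters: it strips all lines once and
-- builds the result by four independent counting passes, one per marker (objective: idiomatic).

-- ===== PORT A =====
def count_tasks (plan_content : String) : List (String × Int) :=
  let counts : PySem.Dict String Int :=
    PySem.Dict.ofList [("pending", 0), ("in_progress", 0), ("completed", 0), ("skipped", 0)]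
  let counts :=
    ((PySem.Str.split? plan_content "\n").getD []).foldl
      (fun counts line =>
        let stripped := PySem.Str.strip line
        if PySem.Str.startswith stripped "- [ ] " then counts.modify "pending" 0 (· + 1)
        else if PySem.Str.startswith stripped "- [~] " then counts.modify "in_progress" 0 (· + 1)
        else if PySem.Str.startswith stripped "- [x] " then counts.modify "completed" 0 (· + 1)
        else if PySem.Str.startswith stripped "- [-] " then counts.modify "skipped" 0 (· + 1)
        else counts)
      counts
  counts.items

-- ===== PORT B =====
def count_tasks_alt (plan_content : String) : List (String × Int) :=
  let stripped := ((PySem.Str.split? plan_content "\n").getD []).map PySem.Str.strip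
  let markers : List (String × String) :=
    [("pending", " "), ("in_progress", "~"), ("completed", "x"), ("skipped", "-")]
  markers.map (fun nm =>
    (nm.1, (stripped.map (fun s =>
      if PySem.Str.startswith s ("- [" ++ nm.2 ++ "] ") then (1 : Int) else 0)).sum))

-- ===== PRECONDITION & SPEC =====
def Spec_count_tasks (plan_content : String) (out : List (String × Int)) : Prop := out = count_tasks_alt plan_content
instance (plan_content : String) (out : List (String × Int)) : Decidable (Spec_count_tasks plan_content out) := by unfold Spec_count_tasks; infer_instance

-- ===== CLAIM (what is proved, stated in full; the proofs are below) =====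
def Claim_equal_count_tasks : Prop := ∀ (plan_content : String), Dom_count_tasks plan_content → Spec_count_tasks plan_content (count_tasks plan_content)

-- ===== LEMMAS AND PROOFS =====

-- two distinct 6-char markers cannot both be prefixes of the same line
theorem chars_startswith_excl (cs p q : List Char) (hp : p.length = 6) (hq : q.length = 6)
    (hne : p ≠ q) (h : p <+: cs) :
    PySem.Chars.startswith cs q = false := by
  rw [← Bool.not_eq_true, PySem.Chars.startswith_iff, List.prefix_iff_eq_take, hq]
  rw [List.prefix_iff_eq_take, hp] at h
  intro h2
  exact hne (h.trans h2.symm)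

-- A's fold keeps the literal four-key dict, each value = start + number of matching lines
theorem countA_fold (L : List String) (a b c d : Int) :
    (L.foldl
      (fun counts line =>
        let stripped := PySem.Str.strip line
        if PySem.Str.startswith stripped "- [ ] " then counts.modify "pending" 0 (· + 1)
        else if PySem.Str.startswith stripped "- [~] " then counts.modify "in_progress" 0 (· + 1)
        else if PySem.Str.startswith stripped "- [x] " then counts.modify "completed" 0 (· + 1)
        else if PySem.Str.startswith stripped "- [-] " then counts.modify "skipped" 0 (· + 1)
        else counts)
      (PySem.Dict.mk [("pending", a), ("in_progress", b), ("completed", c), ("skipped", d)])) =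
    PySem.Dict.mk
      [("pending", a + L.countP (fun l => PySem.Str.startswith (PySem.Str.strip l) "- [ ] ")),
       ("in_progress", b + L.countP (fun l => PySem.Str.startswith (PySem.Str.strip l) "- [~] ")),
       ("completed", c + L.countP (fun l => PySem.Str.startswith (PySem.Str.strip l) "- [x] ")),
       ("skipped", d + L.countP (fun l => PySem.Str.startswith (PySem.Str.strip l) "- [-] "))] := by
  induction L generalizing a b c d with
  | nil => simp
  | cons x xs ih =>
    simp only [List.foldl_cons, List.countP_cons]
    by_cases h1 : PySem.Str.startswith (PySem.Str.strip x) "- [ ] "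
    · rw [show (PySem.Dict.mk [("pending", a), ("in_progress", b), ("completed", c),
          ("skipped", d)]).modify "pending" 0 (· + 1) =
          PySem.Dict.mk [("pending", a + 1), ("in_progress", b), ("completed", c),
          ("skipped", d)] by simp [PySem.Dict.modify, PySem.Dict.insert, PySem.Dict.getD, PySem.Dict.get?, PySem.Dict.contains]]
      simp only [h1, if_pos, ih]
      simp only [pysem] at h1
      simp
      refine ⟨by omega, ?_, ?_, ?_⟩ <;>
        refine chars_startswith_excl _ _ _ ?_ ?_ ?_ h1 <;> decide
    · by_cases h2 : PySem.Str.startswith (PySem.Str.strip x) "- [~] "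
      · rw [show (PySem.Dict.mk [("pending", a), ("in_progress", b), ("completed", c),
            ("skipped", d)]).modify "in_progress" 0 (· + 1) =
            PySem.Dict.mk [("pending", a), ("in_progress", b + 1), ("completed", c),
            ("skipped", d)] by simp [PySem.Dict.modify, PySem.Dict.insert, PySem.Dict.getD, PySem.Dict.get?, PySem.Dict.contains]]
        simp only [h1, h2, if_false, if_true, Bool.false_eq_true, ih]
        simp only [pysem] at h2
        simp
        refine ⟨by omega, ?_, ?_⟩ <;>
          refine chars_startswith_excl _ _ _ ?_ ?_ ?_ h2 <;> decide
      · by_cases h3 : PySem.Str.startswith (PySem.Str.strip x) "- [x] "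
        · rw [show (PySem.Dict.mk [("pending", a), ("in_progress", b), ("completed", c),
              ("skipped", d)]).modify "completed" 0 (· + 1) =
              PySem.Dict.mk [("pending", a), ("in_progress", b), ("completed", c + 1),
              ("skipped", d)] by simp [PySem.Dict.modify, PySem.Dict.insert, PySem.Dict.getD, PySem.Dict.get?, PySem.Dict.contains]]
          simp only [h1, h2, h3, if_false, if_true, Bool.false_eq_true, ih]
          simp only [pysem] at h3
          simp
          refine ⟨by omega, ?_⟩
          refine chars_startswith_excl _ _ _ ?_ ?_ ?_ h3 <;> decide
        · by_cases h4 : PySem.Str.startswith (PySem.Str.strip x) "- [-] "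
          · rw [show (PySem.Dict.mk [("pending", a), ("in_progress", b), ("completed", c),
                ("skipped", d)]).modify "skipped" 0 (· + 1) =
                PySem.Dict.mk [("pending", a), ("in_progress", b), ("completed", c),
                ("skipped", d + 1)] by simp [PySem.Dict.modify, PySem.Dict.insert, PySem.Dict.getD, PySem.Dict.get?, PySem.Dict.contains]]
            simp only [h1, h2, h3, h4, if_false, if_true, Bool.false_eq_true, ih]
            simp
            omega
          · simp only [h1, h2, h3, h4, if_false, Bool.false_eq_true, ih]
            simp

-- B's per-marker sum of 0/1 indicators equals the countP of the predicate
theorem sum_indicator_eq_countP (L : List String) (p : String → Bool) :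
    (L.map (fun s => if p s then (1 : Int) else 0)).sum = (L.countP p : Int) := by
  induction L with
  | nil => simp
  | cons x xs ih =>
    by_cases h : p x <;> simp [h, ih]; omega

-- ===== VERDICT (by name: the statement is the Claim_ definition above) =====
theorem count_tasks_spec : Claim_equal_count_tasks := by
  intro plan_content _
  unfold Spec_count_tasks count_tasks count_tasks_alt
  simp only []
  set L := (PySem.Str.split? plan_content "\n").getD [] with hL
  rw [show (PySem.Dict.ofList [("pending", (0:Int)), ("in_progress", 0), ("completed", 0),
      ("skipped", 0)]) = PySem.Dict.mk [("pending", 0), ("in_progress", 0), ("completed", 0),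
      ("skipped", 0)] from by decide]
  rw [countA_fold L 0 0 0 0]
  simp only [List.map_cons, List.map_nil]
  rw [show (("- [" ++ " " ++ "] " : String)) = "- [ ] " from rfl,
      show (("- [" ++ "~" ++ "] " : String)) = "- [~] " from rfl,
      show (("- [" ++ "x" ++ "] " : String)) = "- [x] " from rfl,
      show (("- [" ++ "-" ++ "] " : String)) = "- [-] " from rfl]
  simp only [sum_indicator_eq_countP, List.countP_map, Function.comp_def]
  simp
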